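-- pv_equiv track=rewrite | github.com/0x3EFFFC8/Uva-Solutions | Problem Solving Paradigms/Complete Search/11127.py | triplefree
-- ===== SOURCE A (Python) =====
-- def check(n,string):
--     ans,beta,t = True,(n+1)//3,1
--     while t <= beta and t+t+t <= n+1 and ans:
--         i = n
--         while i-t-t-t >= -1 and ans:
--             if string[i] == string[i-t] and string[i-t] == string[i-t-t]:
--                 teta,j = True, 0
--                 while j < t and teta:
--                     if string[i-j] != string[i-t-j] or string[i-t-j] != string[i-t-t-j]:
--                          teta = False
--                     j += 1
--                 if teta: ans = False
--             i -= 1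
--         t += 1
--     return ans
--
-- def triplefree(n,string,ans):
--     if n == len(string):
--         if check(n-1,string):
--             ans += 1
--     else:
--         if string[n] == '*':
--             if check(n-1,string):
--                 string[n] = '0'
--                 ans = triplefree(n+1,string,ans)
--                 string[n] = '1'
--                 ans = triplefree(n+1,string,ans)
--                 string[n] = '*'
--         else:
--             ans = triplefree(n+1,string,ans)
--     return ans
-- ===== SOURCE B (Python) =====
-- def triplefree(n, string, ans):
--     # Incremental search: each node verifies only block repetitions ending in
--     # the not-yet-verified window [c, m) (tracked by c) instead of rechecking
--     # the whole prefix at every node as A does.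
--     L = len(string)
--
--     def clear(c, m):
--         # True iff no repetition xxx (block length t) ends at an index in [c, m)
--         t = 1
--         while 3 * t <= m:
--             i = max(c, 3 * t - 1)
--             while i < m:
--                 if string[i] == string[i - t] == string[i - t - t]:
--                     j = 1
--                     while j < t and string[i - j] == string[i - t - j] == string[i - t - t - j]:
--                         j += 1
--                     if j == t:
--                         return False
--                 i += 1
--             t += 1
--         return True
--
--     def count(k, c):
--         if k == L:
--             return 1 if clear(c, L) else 0
--         if string[k] == '*':
--             if not clear(c, k):
--                 return 0
--             string[k] = '0'
--             total = count(k + 1, max(k, 0))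
--             string[k] = '1'
--             total += count(k + 1, max(k, 0))
--             string[k] = '*'
--             return total
--         return count(k + 1, c)
--
--     return ans + count(n, 0)
-- ===== Notes on version B (the rewrite author's own statement) =====
-- stated objective: alternative
-- what changed: B tracks the last verified prefix position and at each recursion node checks only block repetitions ending in the not-yet-verified window instead of re-scanning the whole prefix as A does, and returns an accumulated count added to ans instead of threading the accumulator through the recursion.
import Mathlib
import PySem

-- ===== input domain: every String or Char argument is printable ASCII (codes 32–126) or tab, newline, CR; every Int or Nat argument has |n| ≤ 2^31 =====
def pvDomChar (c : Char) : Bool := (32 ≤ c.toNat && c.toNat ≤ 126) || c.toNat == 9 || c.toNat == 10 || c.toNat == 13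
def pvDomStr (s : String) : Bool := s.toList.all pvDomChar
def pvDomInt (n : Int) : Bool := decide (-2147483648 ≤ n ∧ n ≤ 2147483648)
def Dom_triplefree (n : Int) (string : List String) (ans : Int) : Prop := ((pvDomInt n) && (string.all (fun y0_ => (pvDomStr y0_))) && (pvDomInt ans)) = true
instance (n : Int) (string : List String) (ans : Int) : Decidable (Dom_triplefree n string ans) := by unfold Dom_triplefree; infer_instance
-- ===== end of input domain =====

-- B replaces A's full prefix re-scan at every recursion node by an incremental
-- check of only the block repetitions ending at not-yet-verified indices.
-- (Both Pythons temporarily write into `string` and restore it; the returned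
-- value is what is proved equal here.)

-- string[i] / string[i] = v, Python semantics (negative index from the end);
-- exact under Pre_ (all indices used are in range there)
def pvGet (s : List String) (i : Int) : String := PySem.List.pyGetD s i ""
def pvSet (s : List String) (i : Int) (v : String) : List String := PySem.List.pySetD s i v

-- ===== PORT A =====
-- inner `while j < t and teta` loop of check
def checkJ (s : List String) (t i j : Int) (teta : Bool) : Bool :=
  if _h : j < t ∧ teta = true then
    checkJ s t i (j+1)
      (if pvGet s (i-j) ≠ pvGet s (i-t-j) ∨ pvGet s (i-t-j) ≠ pvGet s (i-t-t-j) then false else teta)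
  else teta
termination_by (t - j).toNat
decreasing_by all_goals omega

-- middle `while i-t-t-t >= -1 and ans` loop of check
def checkI (s : List String) (t i : Int) (ans : Bool) : Bool :=
  if _h : i - t - t - t ≥ -1 ∧ ans = true then
    checkI s t (i-1)
      (if pvGet s i = pvGet s (i-t) ∧ pvGet s (i-t) = pvGet s (i-t-t) then
        (if checkJ s t i 0 true then false else ans)
       else ans)
  else ans
termination_by (i - t - t - t + 2).toNat
decreasing_by all_goals omega

-- outer `while t <= beta and t+t+t <= n+1 and ans` loop of check
def checkT (s : List String) (n beta t : Int) (ans : Bool) : Bool :=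
  if _h : t ≤ beta ∧ t+t+t ≤ n+1 ∧ ans = true then
    checkT s n beta (t+1) (checkI s t n ans)
  else ans
termination_by (beta + 1 - t).toNat
decreasing_by all_goals omega

def checkA (n : Int) (s : List String) : Bool :=
  checkT s n (PySem.Int.floordiv (n+1) 3) 1 true

-- the recursion of A; fuel only makes the recursion total (Python raises
-- IndexError where the fuel would run out, outside Pre_)
def goA : Nat → Int → List String → Int → Int
  | 0, _, _, ans => ans
  | fuel+1, n, s, ans =>
    if n = (s.length : Int) then
      (if checkA (n-1) s then ans + 1 else ans)
    else if pvGet s n = "*" then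
      (if checkA (n-1) s then
        goA fuel (n+1) (pvSet s n "1") (goA fuel (n+1) (pvSet s n "0") ans)
       else ans)
    else goA fuel (n+1) s ans

def triplefree (n : Int) (string : List String) (ans : Int) : Int :=
  goA (((string.length : Int) - n).toNat + 1) n string ans

-- ===== PORT B =====
-- `while j < t and string[i-j] == string[i-t-j] == string[i-t-t-j]` of B's clear
def bJ (s : List String) (i t j : Int) : Int :=
  if _h : j < t ∧ (pvGet s (i-j) = pvGet s (i-t-j) ∧ pvGet s (i-t-j) = pvGet s (i-t-t-j)) then
    bJ s i t (j+1)
  else j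
termination_by (t - j).toNat
decreasing_by all_goals omega

-- inner `while i < m` loop of B's clear
def bI (s : List String) (t i m : Int) : Bool :=
  if _h : i < m then
    (if pvGet s i = pvGet s (i-t) ∧ pvGet s (i-t) = pvGet s (i-t-t) then
      (if bJ s i t 1 = t then false else bI s t (i+1) m)
     else bI s t (i+1) m)
  else true
termination_by (m - i).toNat
decreasing_by all_goals omega

-- outer `while 3 * t <= m` loop of B's clear
def bT (s : List String) (c m t : Int) : Bool :=
  if _h : 3*t ≤ m then
    (if bI s t (max c (3*t-1)) m then bT s c m (t+1) else false)
  else true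
termination_by (m + 1 - 3*t).toNat
decreasing_by all_goals omega

-- clear(c, m) of B
def bClear (s : List String) (c m : Int) : Bool := bT s c m 1

-- count(k, c) of B (same fuel guard as A's port)
def bCount : Nat → List String → Int → Int → Int
  | 0, _, _, _ => 0
  | fuel+1, s, k, c =>
    if k = (s.length : Int) then (if bClear s c (s.length : Int) then 1 else 0)
    else if pvGet s k = "*" then
      (if bClear s c k then
        bCount fuel (pvSet s k "0") (k+1) (max k 0) +
        bCount fuel (pvSet s k "1") (k+1) (max k 0)
       else 0)
    else bCount fuel s (k+1) c

def triplefree_alt (n : Int) (string : List String) (ans : Int) : Int :=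
  ans + bCount (((string.length : Int) - n).toNat + 1) string n 0

-- ===== PRECONDITION & SPEC =====
-- exactly the inputs on which A returns: outside -len ≤ n ≤ len, string[n]
-- (or an index reached by the recursion) raises IndexError
def Pre_triplefree (n : Int) (string : List String) (ans : Int) : Prop :=
  -(string.length : Int) ≤ n ∧ n ≤ (string.length : Int)
instance (n : Int) (string : List String) (ans : Int) : Decidable (Pre_triplefree n string ans) := by
  unfold Pre_triplefree; infer_instance

def pvWitness_triplefree : Int × List String × Int := (0, ["*", "0", "*"], 0)

def Spec_triplefree (n : Int) (string : List String) (ans : Int) (out : Int) : Prop := out = triplefree_alt n string ans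
instance (n : Int) (string : List String) (ans : Int) (out : Int) : Decidable (Spec_triplefree n string ans out) := by unfold Spec_triplefree; infer_instance

-- ===== CLAIM (what is proved, stated in full; the proofs are below) =====
def Claim_equal_triplefree : Prop := ∀ (n : Int) (string : List String) (ans : Int), Dom_triplefree n string ans → Pre_triplefree n string ans → Spec_triplefree n string ans (triplefree n string ans)

-- ===== LEMMAS AND PROOFS =====

-- a repetition xxx of block length t whose last index is i
def Trip (s : List String) (i t : Int) : Prop :=
  ∀ j : Int, 0 ≤ j → j < t →
    pvGet s (i-j) = pvGet s (i-t-j) ∧ pvGet s (i-t-j) = pvGet s (i-t-t-j)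

-- some repetition lies entirely inside the prefix of length m
def HasTrip (s : List String) (m : Int) : Prop :=
  ∃ t i : Int, 1 ≤ t ∧ 3*t ≤ i+1 ∧ i < m ∧ Trip s i t

theorem checkJ_char (s : List String) (t i j : Int) (teta : Bool) :
    checkJ s t i j teta = true ↔
      (teta = true ∧ ∀ j' : Int, j ≤ j' → j' < t →
        pvGet s (i-j') = pvGet s (i-t-j') ∧ pvGet s (i-t-j') = pvGet s (i-t-t-j')) := by
  fun_induction checkJ with
  | case1 j teta h ih =>
    obtain ⟨hjt, hteta⟩ := h
    subst hteta
    by_cases hp : pvGet s (i-j) = pvGet s (i-t-j) ∧ pvGet s (i-t-j) = pvGet s (i-t-t-j)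
    · have hcond : ¬(pvGet s (i-j) ≠ pvGet s (i-t-j) ∨ pvGet s (i-t-j) ≠ pvGet s (i-t-t-j)) := by
        push Not; exact hp
      simp only [dif_neg hcond, if_neg hcond] at ih ⊢
      rw [ih]
      constructor
      · rintro ⟨-, hall⟩
        refine ⟨by trivial, fun j' h1 h2 => ?_⟩
        rcases eq_or_lt_of_le h1 with rfl | h1'
        · exact hp
        · exact hall j' (by omega) h2
      · rintro ⟨-, hall⟩
        exact ⟨by trivial, fun j' h1 h2 => hall j' (by omega) h2⟩
    · have hcond : (pvGet s (i-j) ≠ pvGet s (i-t-j) ∨ pvGet s (i-t-j) ≠ pvGet s (i-t-t-j)) := by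
        tauto
      simp only [dif_pos hcond, if_pos hcond] at ih ⊢
      rw [ih]
      simp only [Bool.false_eq_true, false_and, false_iff]
      rintro ⟨-, hall⟩
      exact hp (hall j (le_refl j) hjt)
  | case2 j teta h =>
    constructor
    · intro ht
      have hjt : ¬ j < t := fun hlt => h ⟨hlt, ht⟩
      exact ⟨ht, fun j' h1 h2 => absurd h2 (by omega)⟩
    · exact fun ⟨ht, _⟩ => ht

theorem checkJ_trip (s : List String) (t i : Int) :
    checkJ s t i 0 true = true ↔ Trip s i t := by
  rw [checkJ_char]
  unfold Trip
  simp only [true_and]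

theorem checkI_char (s : List String) (t : Int) (ht : 1 ≤ t) (i : Int) (ans : Bool) :
    checkI s t i ans = true ↔
      (ans = true ∧ ∀ i' : Int, 3*t - 1 ≤ i' → i' ≤ i → ¬ Trip s i' t) := by
  fun_induction checkI with
  | case1 i ans h ih =>
    obtain ⟨hge, hans⟩ := h
    subst hans
    split_ifs at ih ⊢ with hQ hJ <;> rw [ih]
    · have htr : Trip s i t := (checkJ_trip s t i).mp hJ
      simp only [Bool.false_eq_true, false_and, false_iff]
      rintro ⟨-, hall⟩
      exact hall i (by omega) (le_refl i) htr
    · have htr : ¬ Trip s i t := fun htrip => hJ ((checkJ_trip s t i).mpr htrip)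
      constructor
      · rintro ⟨-, hall⟩
        refine ⟨rfl, fun i' h1 h2 => ?_⟩
        rcases eq_or_lt_of_le h2 with rfl | h2'
        · exact htr
        · exact hall i' h1 (by omega)
      · rintro ⟨-, hall⟩
        exact ⟨rfl, fun i' h1 h2 => hall i' h1 (by omega)⟩
    · have htr : ¬ Trip s i t := by
        intro htrip
        apply hQ
        have := htrip 0 (le_refl 0) (by omega)
        rw [show i-(0:Int) = i by ring, show i-t-(0:Int) = i-t by ring,
            show i-t-t-(0:Int) = i-t-t by ring] at this
        exact this
      constructor
      · rintro ⟨-, hall⟩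
        refine ⟨rfl, fun i' h1 h2 => ?_⟩
        rcases eq_or_lt_of_le h2 with rfl | h2'
        · exact htr
        · exact hall i' h1 (by omega)
      · rintro ⟨-, hall⟩
        exact ⟨rfl, fun i' h1 h2 => hall i' h1 (by omega)⟩
  | case2 i ans h =>
    constructor
    · intro hans
      refine ⟨hans, fun i' h1 h2 => ?_⟩
      have : ¬ (i - t - t - t ≥ -1) := fun hh => h ⟨hh, hans⟩
      exact absurd h1 (by omega)
    · rintro ⟨hans, -⟩
      exact hans

theorem checkT_char (s : List String) (n beta t : Int) (ans : Bool) :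
    1 ≤ t → (checkT s n beta t ans = true ↔
      (ans = true ∧ ∀ t' : Int, t ≤ t' → t' ≤ beta → 3*t' ≤ n+1 →
        ∀ i' : Int, 3*t' - 1 ≤ i' → i' ≤ n → ¬ Trip s i' t')) := by
  fun_induction checkT with
  | case1 t ans h ih =>
    intro ht
    obtain ⟨hb, h3, hans⟩ := h
    subst hans
    by_cases hA : ∀ i' : Int, 3*t - 1 ≤ i' → i' ≤ n → ¬ Trip s i' t
    · have hCI : checkI s t n true = true := (checkI_char s t ht n true).mpr ⟨rfl, hA⟩
      rw [ih (by omega), hCI]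
      constructor
      · rintro ⟨-, hall⟩
        refine ⟨rfl, fun t' h1 h2 h4 => ?_⟩
        rcases eq_or_lt_of_le h1 with rfl | h1'
        · exact hA
        · exact hall t' (by omega) h2 h4
      · rintro ⟨-, hall⟩
        exact ⟨rfl, fun t' h1 h2 h4 => hall t' (by omega) h2 h4⟩
    · have hCI : checkI s t n true = false := by
        cases h' : checkI s t n true
        · rfl
        · exact absurd ((checkI_char s t ht n true).mp h').2 hA
      rw [ih (by omega), hCI]
      simp only [Bool.false_eq_true, false_and, false_iff]
      rintro ⟨-, hall⟩
      exact hA (hall t (le_refl t) hb (by omega))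
  | case2 t ans h =>
    intro ht
    constructor
    · intro hans
      refine ⟨hans, fun t' h1 h2 h4 i' hi1 hi2 => ?_⟩
      exact (h ⟨by omega, by omega, hans⟩).elim
    · rintro ⟨hans, -⟩
      exact hans

theorem checkA_char (m : Int) (s : List String) :
    checkA m s = true ↔ ¬ HasTrip s (m+1) := by
  unfold checkA HasTrip
  rw [checkT_char s m (PySem.Int.floordiv (m+1) 3) 1 true (le_refl 1)]
  have hfd : ∀ t' : Int, t' ≤ PySem.Int.floordiv (m+1) 3 ↔ t' * 3 ≤ m+1 := fun t' =>
    PySem.Int.le_floordiv_iff_mul_le (by omega)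
  constructor
  · rintro ⟨-, hall⟩ ⟨t, i, h1, h2, h3, h4⟩
    exact hall t h1 ((hfd t).mpr (by omega)) (by omega) i (by omega) (by omega) h4
  · intro hno
    exact ⟨rfl, fun t' h1 hb h3 i' hi1 hi2 htrip => hno ⟨t', i', h1, by omega, by omega, htrip⟩⟩

theorem bJ_char (s : List String) (i t j : Int) :
    j ≤ t → (bJ s i t j = t ↔
      (∀ j' : Int, j ≤ j' → j' < t →
        pvGet s (i-j') = pvGet s (i-t-j') ∧ pvGet s (i-t-j') = pvGet s (i-t-t-j'))) := by
  fun_induction bJ with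
  | case1 j h ih =>
    intro hj
    obtain ⟨hjt, hp⟩ := h
    rw [ih (by omega)]
    constructor
    · intro hall j' h1 h2
      rcases eq_or_lt_of_le h1 with rfl | h1'
      · exact hp
      · exact hall j' (by omega) h2
    · intro hall j' h1 h2
      exact hall j' (by omega) h2
  | case2 j h =>
    intro hj
    by_cases hjt : j < t
    · have hP : ¬ (pvGet s (i-j) = pvGet s (i-t-j) ∧ pvGet s (i-t-j) = pvGet s (i-t-t-j)) :=
        fun hp => h ⟨hjt, hp⟩
      constructor
      · intro he
        exact absurd he (by omega)
      · intro hall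
        exact (hP (hall j (le_refl j) hjt)).elim
    · constructor
      · intro _ j' h1 h2
        exact absurd h2 (by omega)
      · intro _
        omega

theorem bJ_trip (s : List String) (i t : Int) (ht : 1 ≤ t) :
    (pvGet s i = pvGet s (i-t) ∧ pvGet s (i-t) = pvGet s (i-t-t)) ∧ bJ s i t 1 = t ↔
      Trip s i t := by
  rw [bJ_char s i t 1 ht]
  unfold Trip
  constructor
  · rintro ⟨hq, hall⟩ j hj0 hjt
    rcases eq_or_lt_of_le hj0 with rfl | hj0'
    · rw [show i-(0:Int) = i by ring, show i-t-(0:Int) = i-t by ring,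
          show i-t-t-(0:Int) = i-t-t by ring]
      exact hq
    · exact hall j (by omega) hjt
  · intro htr
    refine ⟨?_, fun j' h1 h2 => htr j' (by omega) h2⟩
    have := htr 0 (le_refl 0) (by omega)
    rw [show i-(0:Int) = i by ring, show i-t-(0:Int) = i-t by ring,
        show i-t-t-(0:Int) = i-t-t by ring] at this
    exact this

theorem bI_char (s : List String) (t : Int) (ht : 1 ≤ t) (i m : Int) :
    bI s t i m = true ↔ ∀ i' : Int, i ≤ i' → i' < m → ¬ Trip s i' t := by
  fun_induction bI with
  | case1 i h hq hbj =>
    have htr : Trip s i t := (bJ_trip s i t ht).mp ⟨hq, hbj⟩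
    simp only [Bool.false_eq_true, false_iff]
    intro hall
    exact hall i (le_refl i) h htr
  | case2 i h hq hbj ih =>
    have htr : ¬ Trip s i t := fun htrip => hbj ((bJ_trip s i t ht).mpr htrip).2
    rw [ih]
    constructor
    · intro hall i' h1 h2
      rcases eq_or_lt_of_le h1 with rfl | h1'
      · exact htr
      · exact hall i' (by omega) h2
    · intro hall i' h1 h2
      exact hall i' (by omega) h2
  | case3 i h hq ih =>
    have htr : ¬ Trip s i t := by
      intro htrip
      exact hq ((bJ_trip s i t ht).mpr htrip).1
    rw [ih]
    constructor
    · intro hall i' h1 h2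
      rcases eq_or_lt_of_le h1 with rfl | h1'
      · exact htr
      · exact hall i' (by omega) h2
    · intro hall i' h1 h2
      exact hall i' (by omega) h2
  | case4 i h =>
    constructor
    · intro _ i' h1 h2
      exact absurd h2 (by omega)
    · intro _
      rfl

theorem bT_char (s : List String) (c m t : Int) :
    1 ≤ t → (bT s c m t = true ↔
      ∀ t' : Int, t ≤ t' → 3*t' ≤ m →
        ∀ i' : Int, max c (3*t'-1) ≤ i' → i' < m → ¬ Trip s i' t') := by
  fun_induction bT with
  | case1 t h hbi ih =>
    intro ht
    rw [ih (by omega)]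
    have hI := (bI_char s t ht (max c (3*t-1)) m).mp hbi
    constructor
    · intro hall t' h1 h2 i' hi1 hi2
      rcases eq_or_lt_of_le h1 with rfl | h1'
      · exact hI i' hi1 hi2
      · exact hall t' (by omega) h2 i' hi1 hi2
    · intro hall t' h1 h2 i' hi1 hi2
      exact hall t' (by omega) h2 i' hi1 hi2
  | case2 t h hbi =>
    intro ht
    simp only [Bool.false_eq_true, false_iff]
    intro hall
    apply hbi
    rw [bI_char s t ht (max c (3*t-1)) m]
    exact fun i' hi1 hi2 => hall t (le_refl t) h i' hi1 hi2
  | case3 t h =>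
    intro ht
    constructor
    · intro _ t' h1 h2
      exact absurd h2 (by omega)
    · intro _
      rfl

theorem bClear_char (s : List String) (c m : Int) :
    bClear s c m = true ↔
      ∀ i' : Int, c ≤ i' → i' < m → ∀ t' : Int, 1 ≤ t' → 3*t' ≤ i'+1 → ¬ Trip s i' t' := by
  unfold bClear
  rw [bT_char s c m 1 (le_refl 1)]
  constructor
  · intro hall i' h1 h2 t' ht' h3
    exact hall t' ht' (by omega) i' (by omega) h2
  · intro hall t' h1 h2 i' hi1 hi2
    exact hall i' (by omega) hi2 t' (by omega) (by omega)

theorem not_hasTrip_small (s : List String) (m : Int) (h : m ≤ 2) : ¬ HasTrip s m := by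
  rintro ⟨t, i, h1, h2, h3, _⟩; omega

theorem clear_iff (s : List String) (c m : Int) (h : ¬ HasTrip s c) :
    (bClear s c m = true ↔ ¬ HasTrip s m) := by
  rw [bClear_char]
  constructor
  · rintro hall ⟨t, i, h1, h2, h3, h4⟩
    by_cases hic : i < c
    · exact h ⟨t, i, h1, h2, hic, h4⟩
    · exact hall i (by omega) h3 t h1 h2 h4
  · intro hm i' hc hm' t' ht' h3 htrip
    exact hm ⟨t', i', ht', h3, hm', htrip⟩

theorem checkA_eq_bClear (s : List String) (c k : Int) (h : ¬ HasTrip s c) :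
    checkA (k-1) s = bClear s c k := by
  have h1 := checkA_char (k-1) s
  have h2 := clear_iff s c k h
  rw [show k - 1 + 1 = k by omega] at h1
  cases hA : checkA (k-1) s <;> cases hB : bClear s c k <;> simp_all

theorem pvGet_pvSet_lt (s : List String) (k x : Int) (v : String)
    (hx0 : 0 ≤ x) (hxk : x < k) : pvGet (pvSet s k v) x = pvGet s x := by
  unfold pvGet pvSet
  rw [PySem.List.pySetD_of_nonneg s v (by omega),
      PySem.List.pyGetD_of_nonneg _ "" hx0, PySem.List.pyGetD_of_nonneg _ "" hx0]
  simp only [List.getD_eq_getElem?_getD, List.getElem?_set]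
  rw [if_neg (by omega : ¬ k.toNat = x.toNat)]

theorem trip_pvSet (s : List String) (k : Int) (v : String) (i t : Int)
    (h1 : 1 ≤ t) (h2 : 3*t ≤ i+1) (h3 : i < k) :
    Trip (pvSet s k v) i t → Trip s i t := by
  intro h j hj0 hjt
  have e1 := pvGet_pvSet_lt s k (i-j) v (by omega) (by omega)
  have e2 := pvGet_pvSet_lt s k (i-t-j) v (by omega) (by omega)
  have e3 := pvGet_pvSet_lt s k (i-t-t-j) v (by omega) (by omega)
  have := h j hj0 hjt
  rw [e1, e2, e3] at this
  exact this

theorem not_hasTrip_pvSet (s : List String) (k : Int) (v : String)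
    (h : ¬ HasTrip s k) : ¬ HasTrip (pvSet s k v) k := by
  rintro ⟨t, i, h1, h2, h3, h4⟩
  exact h ⟨t, i, h1, h2, h3, trip_pvSet s k v i t h1 h2 h3 h4⟩

theorem main_lemma (fuel : Nat) : ∀ (n : Int) (s : List String) (c ans : Int),
    0 ≤ c → c ≤ max n 0 → ¬ HasTrip s c →
    goA fuel n s ans = ans + bCount fuel s n c := by
  induction fuel with
  | zero => intro n s c ans _ _ _; simp [goA, bCount]
  | succ f ih =>
    intro n s c ans hc0 hcn hnt
    simp only [goA, bCount]
    split
    · rw [checkA_eq_bClear s c n hnt]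
      rename_i hn
      rw [hn]
      split <;> omega
    · split
      · rw [checkA_eq_bClear s c n hnt]
        split
        · rename_i hclear
          have hn : ¬ HasTrip s n := (clear_iff s c n hnt).mp hclear
          have hmax : ¬ HasTrip s (max n 0) := by
            by_cases h : 0 ≤ n
            · rwa [max_eq_left h]
            · rw [max_eq_right (by omega)]
              exact not_hasTrip_small s 0 (by omega)
          have h0 : ¬ HasTrip (pvSet s n "0") (max n 0) := by
            by_cases h : 0 ≤ n
            · rw [max_eq_left h] at hmax ⊢; exact not_hasTrip_pvSet s n "0" hmax
            · rw [max_eq_right (by omega)]; exact not_hasTrip_small _ 0 (by omega)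
          have h1 : ¬ HasTrip (pvSet s n "1") (max n 0) := by
            by_cases h : 0 ≤ n
            · rw [max_eq_left h] at hmax ⊢; exact not_hasTrip_pvSet s n "1" hmax
            · rw [max_eq_right (by omega)]; exact not_hasTrip_small _ 0 (by omega)
          rw [ih (n+1) (pvSet s n "0") (max n 0) ans (by omega) (by omega) h0,
              ih (n+1) (pvSet s n "1") (max n 0)
                (ans + bCount f (pvSet s n "0") (n+1) (max n 0)) (by omega) (by omega) h1]
          omega
        · omega
      · exact ih (n+1) s c ans hc0 (by omega) hnt

-- ===== VERDICT (by name: the statement is the Claim_ definition above) =====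
theorem triplefree_spec : Claim_equal_triplefree := by
  intro n s ans _ _
  unfold Spec_triplefree triplefree triplefree_alt
  exact main_lemma _ n s 0 ans (by omega) (by omega) (not_hasTrip_small s 0 (by omega))
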